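-- pv_equiv track=rewrite | github.com/ChrisP11/beeropen-share | outing/views.py | _normalize_size
-- ===== SOURCE A (Python) =====
-- SIZE_MAP = {
--     "XS": {"XS", "XSMALL", "X-SMALL"},
--     "S":  {"S", "SM", "SMALL"},
--     "M":  {"M", "MED", "MEDIUM"},
--     "L":  {"L", "LG", "LARGE"},
--     "XL": {"XL", "X-LARGE"},
--     "2XL": {"2X", "XXL", "2XL", "XX-LARGE"},
--     "3XL": {"3X", "XXXL", "3XL", "XXX-LARGE"},
-- }
--
-- def _normalize_size(text: str) -> str | None:
--     t = "".join(ch for ch in text.upper() if ch.isalnum() or ch in {" ", "-"})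
--     tokens = [tok for tok in t.replace("-", " ").split() if tok]
--     # allow bare "L", "XL", etc. or phrases like "size xl", "shirt 2xl"
--     for tok in tokens[::-1]:  # prefer last token
--         for canon, synonyms in SIZE_MAP.items():
--             if tok in synonyms:
--                 return canon
--     return None
-- ===== SOURCE B (Python) =====
-- SIZE_MAP = {
--     "XS": {"XS", "XSMALL", "X-SMALL"},
--     "S":  {"S", "SM", "SMALL"},
--     "M":  {"M", "MED", "MEDIUM"},
--     "L":  {"L", "LG", "LARGE"},
--     "XL": {"XL", "X-LARGE"},
--     "2XL": {"2X", "XXL", "2XL", "XX-LARGE"},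
--     "3XL": {"3X", "XXXL", "3XL", "XXX-LARGE"},
-- }
--
-- # flat reverse lookup, built once (synonym sets are disjoint, so order is irrelevant)
-- _REVERSE = {syn: canon for canon, syns in SIZE_MAP.items() for syn in syns}
--
-- def _normalize_size(text: str) -> str | None:
--     # single pass over the characters: build tokens on the fly, keep the last match
--     best = None
--     tok = []
--     for ch in text.upper():
--         if ch.isalnum():
--             tok.append(ch)
--         elif ch == " " or ch == "-":
--             if tok:
--                 best = _REVERSE.get("".join(tok), best)
--                 tok = []
--         # any other character is dropped without ending the token (as A deletes it)
--     if tok: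
--         best = _REVERSE.get("".join(tok), best)
--     return best
-- ===== Notes on version B (the rewrite author's own statement) =====
-- stated objective: alternative
-- what changed: B precomputes a flat synonym-to-canonical reverse dict and replaces A's clean/replace/split passes plus nested scan over SIZE_MAP with a single forward character scan that tokenizes on the fly and keeps the last dict hit.
import Mathlib
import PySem

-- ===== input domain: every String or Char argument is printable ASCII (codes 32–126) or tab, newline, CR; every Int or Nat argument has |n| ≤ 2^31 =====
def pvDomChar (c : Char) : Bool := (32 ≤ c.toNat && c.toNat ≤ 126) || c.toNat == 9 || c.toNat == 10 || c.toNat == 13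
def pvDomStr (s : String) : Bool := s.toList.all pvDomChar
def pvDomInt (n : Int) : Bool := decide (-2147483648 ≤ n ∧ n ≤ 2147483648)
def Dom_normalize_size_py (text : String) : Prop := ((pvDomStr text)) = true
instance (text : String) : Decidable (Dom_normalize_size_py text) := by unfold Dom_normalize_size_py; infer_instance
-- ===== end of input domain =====

-- B replaces A's nested scan over SIZE_MAP with a flat reverse-lookup dict and a single
-- forward character scan that tokenizes on the fly, keeping the last matching token.

-- ===== PORT A =====
-- ch.isalnum() or ch in {" ", "-"}
def pvKeptA (c : Char) : Bool := PySem.Chars.isalnum c || c == ' ' || c == '-'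

-- SIZE_MAP (module constant): dict of canonical size → set of synonyms
def pvSizeMap : List (List Char × PySem.Set (List Char)) :=
  [ ("XS".toList,  PySem.Set.ofList ["XS".toList, "XSMALL".toList, "X-SMALL".toList]),
    ("S".toList,   PySem.Set.ofList ["S".toList, "SM".toList, "SMALL".toList]),
    ("M".toList,   PySem.Set.ofList ["M".toList, "MED".toList, "MEDIUM".toList]),
    ("L".toList,   PySem.Set.ofList ["L".toList, "LG".toList, "LARGE".toList]),
    ("XL".toList,  PySem.Set.ofList ["XL".toList, "X-LARGE".toList]),
    ("2XL".toList, PySem.Set.ofList ["2X".toList, "XXL".toList, "2XL".toList, "XX-LARGE".toList]),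
    ("3XL".toList, PySem.Set.ofList ["3X".toList, "XXXL".toList, "3XL".toList, "XXX-LARGE".toList]) ]

-- inner loop: for canon, synonyms in SIZE_MAP.items(): if tok in synonyms: return canon
def pvInnerA : List (List Char × PySem.Set (List Char)) → List Char → Option (List Char)
  | [], _ => none
  | (canon, syns) :: rest, tok =>
      if PySem.Set.contains syns tok then some canon else pvInnerA rest tok

-- outer loop: for tok in tokens[::-1] (the list is reversed before this helper is called)
def pvOuterA : List (List Char) → Option (List Char)
  | [] => none
  | tok :: rest =>
      match pvInnerA pvSizeMap tok with
      | some canon => some canon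
      | none => pvOuterA rest

def normalize_size_py (text : String) : Option String :=
  let t := (PySem.Chars.upper text.toList).filter pvKeptA
  let tokens := (PySem.Chars.split₀ (PySem.Chars.replace t ['-'] [' '])).filter (fun tok => !tok.isEmpty)
  (pvOuterA tokens.reverse).map (fun cs => String.mk cs)

-- ===== PORT B =====
-- the same SIZE_MAP, synonyms as plain lists: the Python dict comprehension iterates each
-- synonym set in an arbitrary order, but all synonym keys are pairwise distinct, so the
-- resulting dict does not depend on that order; we fix the orders written in the source
def pvGroupsB : List (List Char × List (List Char)) :=
  [ ("XS".toList,  ["XS".toList, "XSMALL".toList, "X-SMALL".toList]),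
    ("S".toList,   ["S".toList, "SM".toList, "SMALL".toList]),
    ("M".toList,   ["M".toList, "MED".toList, "MEDIUM".toList]),
    ("L".toList,   ["L".toList, "LG".toList, "LARGE".toList]),
    ("XL".toList,  ["XL".toList, "X-LARGE".toList]),
    ("2XL".toList, ["2X".toList, "XXL".toList, "2XL".toList, "XX-LARGE".toList]),
    ("3XL".toList, ["3X".toList, "XXXL".toList, "3XL".toList, "XXX-LARGE".toList]) ]

-- _REVERSE = {syn: canon for canon, syns in SIZE_MAP.items() for syn in syns}
def pvRevMap : PySem.Dict (List Char) (List Char) :=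
  (pvGroupsB.flatMap (fun g => g.2.map (fun s => (s, g.1)))).foldl
    (fun d p => d.insert p.1 p.2) ⟨[]⟩

-- the loop body: extend the token, or flush it into `best` at a separator, or drop the char
def pvStepB (s : Option (List Char) × List Char) (ch : Char) : Option (List Char) × List Char :=
  if PySem.Chars.isalnum ch then (s.1, s.2 ++ [ch])
  else if ch == ' ' || ch == '-' then
    if s.2 ≠ [] then ((PySem.Dict.get? pvRevMap s.2).or s.1, ([] : List Char)) else s
  else s

def normalize_size_py_alt (text : String) : Option String :=
  let st := (PySem.Chars.upper text.toList).foldl pvStepB (none, [])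
  let best := if st.2 ≠ [] then (PySem.Dict.get? pvRevMap st.2).or st.1 else st.1
  best.map (fun cs => String.mk cs)

-- ===== PRECONDITION & SPEC =====
def Spec_normalize_size_py (text : String) (out : Option String) : Prop := out = normalize_size_py_alt text
instance (text : String) (out : Option String) : Decidable (Spec_normalize_size_py text out) := by unfold Spec_normalize_size_py; infer_instance

-- ===== CLAIM (what is proved, stated in full; the proofs are below) =====
def Claim_equal_normalize_size_py : Prop := ∀ (text : String), Dom_normalize_size_py text → Spec_normalize_size_py text (normalize_size_py text)

-- ===== LEMMAS AND PROOFS =====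

-- reference splitter: Python str.split() on a char list, tokens accumulated left-to-right
def pvSplit : List Char → List Char → List (List Char)
  | [], cur => if cur = [] then [] else [cur]
  | c :: rest, cur =>
      if PySem.Chars.isspace c then
        (if cur = [] then pvSplit rest [] else cur :: pvSplit rest [])
      else pvSplit rest (cur ++ [c])

-- '-' → ' ' on one character
def pvD (c : Char) : Char := if c == '-' then ' ' else c

-- facts about the character classes of A's kept characters
theorem pv_alnum_facts (c : Char) (h : PySem.Chars.isalnum c = true) :
    PySem.Chars.isspace c = false ∧ (c == ' ') = false ∧ (c == '-') = false := by
  refine ⟨?_, ?_, ?_⟩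
  · have e : c.toNat = c.val.toNat := rfl
    simp only [PySem.Chars.isalnum, PySem.Chars.isalpha, PySem.Chars.isdigit, PySem.Chars.isupper,
      PySem.Chars.islower, Bool.or_eq_true, Bool.and_eq_true, decide_eq_true_eq,
      Char.le_def, UInt32.le_iff_toNat_le] at h
    simp only [PySem.Chars.isspace, Bool.or_eq_false_iff, Bool.and_eq_false_iff,
      decide_eq_false_iff_not, not_le, e]
    have eA : ('A'.val.toNat) = 65 := by decide
    have eZ : ('Z'.val.toNat) = 90 := by decide
    have ea : ('a'.val.toNat) = 97 := by decide
    have ez : ('z'.val.toNat) = 122 := by decide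
    have e0 : ('0'.val.toNat) = 48 := by decide
    have e9 : ('9'.val.toNat) = 57 := by decide
    omega
  · by_cases hc : c = ' '
    · subst hc; exact absurd h (by decide)
    · simpa using hc
  · by_cases hc : c = '-'
    · subst hc; exact absurd h (by decide)
    · simpa using hc

theorem pv_split₀_go_eq (s : List Char) : ∀ cur acc,
    PySem.Chars.split₀.go s cur acc = acc.reverse ++ pvSplit s cur.reverse := by
  induction s with
  | nil =>
      intro cur acc
      cases cur <;> simp [PySem.Chars.split₀.go, pvSplit]
  | cons c rest ih =>
      intro cur acc
      by_cases hs : PySem.Chars.isspace c = true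
      · by_cases hc : cur = []
        · subst hc; simp [PySem.Chars.split₀.go, hs, pvSplit, ih]
        · have : cur.isEmpty = false := by simpa [List.isEmpty_iff] using hc
          simp [PySem.Chars.split₀.go, hs, this, pvSplit, ih, List.reverse_eq_nil_iff, hc]
      · have hs' : PySem.Chars.isspace c = false := by simpa using hs
        simp [PySem.Chars.split₀.go, hs', pvSplit, ih]

theorem pv_split₀_eq (s : List Char) : PySem.Chars.split₀ s = pvSplit s [] := by
  simpa using pv_split₀_go_eq s [] []

theorem pv_replace_go_eq (o n : Char) (l : List Char) : ∀ fuel acc, l.length ≤ fuel →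
    PySem.Chars.replace.go [o] [n] fuel l acc
      = acc.reverse ++ l.map (fun c => if c == o then n else c) := by
  induction l with
  | nil => intro fuel acc _; cases fuel <;> simp [PySem.Chars.replace.go]
  | cons c t ih =>
      intro fuel acc hf
      cases fuel with
      | zero => simp at hf
      | succ f =>
          have hpr : [o].isPrefixOf (c :: t) = (o == c) := by simp [List.isPrefixOf]
          by_cases hoc : o = c
          · subst hoc
            simp [PySem.Chars.replace.go, hpr, ih f _ (by simpa using hf)]
          · have h1 : (o == c) = false := by simpa using hoc
            have h2 : (c == o) = false := by simpa using Ne.symm hoc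
            simp [PySem.Chars.replace.go, hpr, h1, ih f _ (by simpa using hf)]
            intro h; exact absurd h.symm hoc

theorem pv_replace_eq (s : List Char) :
    PySem.Chars.replace s ['-'] [' '] = s.map pvD := by
  have h := pv_replace_go_eq '-' ' ' s s.length [] (le_refl _)
  simp only [List.reverse_nil, List.nil_append] at h
  unfold PySem.Chars.replace
  simpa only [List.isEmpty_cons, Bool.false_eq_true, if_false, pvD] using h

theorem pv_split_ne_nil (s : List Char) : ∀ cur tok, tok ∈ pvSplit s cur → tok ≠ [] := by
  induction s with
  | nil =>
      intro cur tok h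
      by_cases hc : cur = []
      · simp [pvSplit, hc] at h
      · simp [pvSplit, hc] at h
        exact h ▸ hc
  | cons c rest ih =>
      intro cur tok h
      by_cases hs : PySem.Chars.isspace c = true
      · by_cases hc : cur = []
        · exact ih [] tok (by simpa [pvSplit, hs, hc] using h)
        · rcases (by simpa [pvSplit, hs, hc] using h : tok = cur ∨ tok ∈ pvSplit rest []) with hicase | h2
          · simpa [hicase] using hc
          · exact ih [] tok h2
      · have hs' : PySem.Chars.isspace c = false := by simpa using hs
        exact ih (cur ++ [c]) tok (by simpa [pvSplit, hs'] using h)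

theorem pv_filter_split (s : List Char) :
    (pvSplit s []).filter (fun tok => !tok.isEmpty) = pvSplit s [] := by
  apply List.filter_eq_self.mpr
  intro tok h
  simpa [List.isEmpty_iff] using pv_split_ne_nil s [] tok h

-- the inner loop over grouped synonym sets is first-match lookup in the flattened pair list
theorem pv_find_map_const (syns : List (List Char)) (canon tok : List Char) :
    (List.find? (fun p => p.1 == tok) (syns.map (fun s => (s, canon)))).map Prod.snd
      = if List.contains syns tok then some canon else none := by
  induction syns with
  | nil => simp
  | cons s rest ih =>
      simp only [List.map_cons, List.find?_cons, List.contains_cons]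
      by_cases h : s = tok
      · simp [h]
      · have h1 : (s == tok) = false := by simpa using h
        have h2 : (tok == s) = false := by simpa using Ne.symm h
        simp only [h1, Bool.false_eq_true, if_false, h2, Bool.false_or]
        exact ih

theorem pv_innerA_eq_find (groups : List (List Char × PySem.Set (List Char))) (tok : List Char) :
    pvInnerA groups tok
      = (List.find? (fun p => p.1 == tok)
          (groups.flatMap (fun g => g.2.map (fun s => (s, g.1))))).map Prod.snd := by
  induction groups with
  | nil => simp [pvInnerA]
  | cons g rest ih =>
      obtain ⟨canon, syns⟩ := g
      simp only [pvInnerA, PySem.Set.contains, List.flatMap_cons, List.find?_append,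
        Option.map_or]
      rw [pv_find_map_const, ← ih]
      by_cases h : tok ∈ syns
      · simp [h]
      · simp [h]

-- the two literal lookup tables agree entry for entry
theorem pv_revMap_items :
    pvRevMap.items = pvSizeMap.flatMap (fun g => g.2.map (fun s => (s, g.1))) := by
  decide

theorem pv_lookup_eq (tok : List Char) :
    pvInnerA pvSizeMap tok = PySem.Dict.get? pvRevMap tok := by
  rw [pv_innerA_eq_find, PySem.Dict.get?, pv_revMap_items]

-- A's double loop over the reversed token list is a last-match-wins left fold
theorem pv_outerA_cons (tok : List Char) (rest : List (List Char)) :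
    pvOuterA (tok :: rest) = (pvInnerA pvSizeMap tok).or (pvOuterA rest) := by
  cases h : pvInnerA pvSizeMap tok <;> simp [pvOuterA, h]

theorem pv_outerA_append (xs ys : List (List Char)) :
    pvOuterA (xs ++ ys) = (pvOuterA xs).or (pvOuterA ys) := by
  induction xs with
  | nil => simp [pvOuterA]
  | cons tok rest ih => simp [pv_outerA_cons, ih, Option.or_assoc]

theorem pv_outerA_rev (l : List (List Char)) : ∀ b,
    (pvOuterA l.reverse).or b
      = l.foldl (fun b tok => (pvInnerA pvSizeMap tok).or b) b := by
  induction l with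
  | nil => intro b; simp [pvOuterA]
  | cons tok rest ih =>
      intro b
      simp only [List.reverse_cons, pv_outerA_append, List.foldl_cons, Option.or_assoc]
      rw [← ih]
      congr 1
      cases hx : pvInnerA pvSizeMap tok <;> simp [pvOuterA, hx, Option.or]

-- B's fold ignores the characters A's filter drops
theorem pv_stepB_skip (c : Char) (h : pvKeptA c = false) (s : Option (List Char) × List Char) :
    pvStepB s c = s := by
  simp only [pvKeptA, Bool.or_eq_false_iff] at h
  simp [pvStepB, h.1.1, h.1.2, h.2]

theorem pv_foldl_filter_kept (cs : List Char) : ∀ s,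
    cs.foldl pvStepB s = (cs.filter pvKeptA).foldl pvStepB s := by
  induction cs with
  | nil => intro s; simp
  | cons c rest ih =>
      intro s
      by_cases h : pvKeptA c = true
      · simp [List.filter_cons, h, ih]
      · have h' : pvKeptA c = false := by simpa using h
        simp [List.filter_cons, h', ih, pv_stepB_skip c h' s]

-- the scanner invariant: over kept characters, B's fold + final flush computes the
-- last-match fold over the tokens pvSplit produces (with '-' already turned into ' ')
theorem pv_scan_eq (t : List Char) (hk : ∀ c ∈ t, pvKeptA c = true) : ∀ best cur,
    (if (t.foldl pvStepB (best, cur)).2 ≠ [] then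
       (PySem.Dict.get? pvRevMap (t.foldl pvStepB (best, cur)).2).or (t.foldl pvStepB (best, cur)).1
     else (t.foldl pvStepB (best, cur)).1)
      = (pvSplit (t.map pvD) cur).foldl
          (fun b tok => (PySem.Dict.get? pvRevMap tok).or b) best := by
  induction t with
  | nil =>
      intro best cur
      by_cases hc : cur = [] <;> simp [pvSplit, hc]
  | cons c rest ih =>
      intro best cur
      have hkc : pvKeptA c = true := hk c (List.mem_cons_self)
      have hk' : ∀ x ∈ rest, pvKeptA x = true := fun x hx => hk x (List.mem_cons_of_mem c hx)
      by_cases ha : PySem.Chars.isalnum c = true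
      · obtain ⟨hsp, hspace, hdash⟩ := pv_alnum_facts c ha
        simp only [List.map_cons, List.foldl_cons, pvStepB, ha, if_true, pvD, hdash,
          Bool.false_eq_true, if_false, pvSplit, hsp]
        exact ih hk' best (cur ++ [c])
      · have ha' : PySem.Chars.isalnum c = false := by simpa using ha
        have hsep : (c == ' ' || c == '-') = true := by
          simp only [pvKeptA, ha', Bool.false_or] at hkc; exact hkc
        have hd : pvD c = ' ' := by
          rcases (by simpa using hsep : c = ' ' ∨ c = '-') with h | h <;> simp [pvD, h]
        have hsp : PySem.Chars.isspace (pvD c) = true := by rw [hd]; decide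
        by_cases hc : cur = []
        · subst hc
          simp only [List.map_cons, List.foldl_cons, pvStepB, ha', Bool.false_eq_true, if_false,
            hsep, if_true, ne_eq, not_true_eq_false, pvSplit, hsp]
          simpa using ih hk' best []
        · simp only [List.map_cons, List.foldl_cons, pvStepB, ha', Bool.false_eq_true, if_false,
            hsep, if_true, ne_eq, hc, not_false_eq_true, pvSplit, hsp]
          simpa [hc] using ih hk' ((PySem.Dict.get? pvRevMap cur).or best) []

-- ===== VERDICT (by name: the statement is the Claim_ definition above) =====
theorem normalize_size_py_spec : Claim_equal_normalize_size_py := by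
  intro text _
  unfold Spec_normalize_size_py
  simp only [normalize_size_py, normalize_size_py_alt]
  rw [pv_foldl_filter_kept]
  rw [pv_replace_eq, pv_split₀_eq, pv_filter_split]
  congr 1
  have ht : ∀ c ∈ (PySem.Chars.upper text.toList).filter pvKeptA, pvKeptA c = true :=
    fun c hc => (List.mem_filter.mp hc).2
  rw [pv_scan_eq _ ht]
  rw [← Option.or_none (o := pvOuterA _), pv_outerA_rev]
  simp only [pv_lookup_eq]
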